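-- pv_equiv track=rewrite | github.com/CSU-KangHu/HiTE | ReferenceMode/main_0523.py | three_bit_encode
-- ===== SOURCE A (Python) =====
-- dict_encode = {'A': 0b001, 'C': 0b011, 'G': 0b010, 'T': 0b100, 'N': 0b101}
--
-- def three_bit_encode(str):
--     bytes = 0b000
--     for i in range(len(str)):
--         bytes <<= 3
--         base = str[i]
--         if not dict_encode.__contains__(base):
--             base = 'N'
--         bytes += dict_encode[base]
--     return bytes
-- ===== SOURCE B (Python) =====
-- dict_encode = {'A': 0b001, 'C': 0b011, 'G': 0b010, 'T': 0b100, 'N': 0b101}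
--
-- def three_bit_encode(str):
--     bits = ''.join(format(dict_encode.get(ch, 0b101), '03b') for ch in str)
--     return int('0' + bits, 2)
-- ===== Notes on version B (the rewrite author's own statement) =====
-- stated objective: idiomatic
-- what changed: Instead of shift-and-add arithmetic in an index loop, B maps each character (unknown bases defaulting to the N-code) to its three-digit binary representation, joins these into one bit string, and lets a single base-2 int parse do the packing.
import Mathlib
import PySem

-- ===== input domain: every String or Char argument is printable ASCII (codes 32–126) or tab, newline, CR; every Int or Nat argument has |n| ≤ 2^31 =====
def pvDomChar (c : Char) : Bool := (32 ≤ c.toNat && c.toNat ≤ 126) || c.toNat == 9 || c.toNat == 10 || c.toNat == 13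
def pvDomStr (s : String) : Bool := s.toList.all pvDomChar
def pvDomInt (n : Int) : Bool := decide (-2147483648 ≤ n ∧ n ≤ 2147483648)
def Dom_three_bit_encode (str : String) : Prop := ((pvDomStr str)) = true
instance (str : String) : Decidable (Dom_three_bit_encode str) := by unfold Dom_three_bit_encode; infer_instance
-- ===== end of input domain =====

-- B replaces A's shift-and-add loop by building the 3-digit binary string of each code and parsing the
-- joined bit-string once with int(·, 2) (objective: idiomatic; same asymptotic cost).

-- ===== PORT A =====
def dict_encode : PySem.Dict Char Int :=
  PySem.Dict.ofList [('A', 1), ('C', 3), ('G', 2), ('T', 4), ('N', 5)]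

def three_bit_encode (str : String) : Int :=
  str.toList.foldl (fun bytes c =>
    let bytes := bytes * 8            -- bytes <<= 3
    let base := if dict_encode.contains c then c else 'N'
    bytes + dict_encode.getD base 0) 0

-- ===== PORT B =====
-- B's own copy of the encoding table
def dict_encode_b : PySem.Dict Char Int :=
  PySem.Dict.ofList [('A', 1), ('C', 3), ('G', 2), ('T', 4), ('N', 5)]

-- hand port of format(n, '03b'): exact for 0 ≤ n ≤ 7 (the only codes B feeds it)
def fmt3 (n : Int) : List Char :=
  [if n / 4 % 2 = 1 then '1' else '0',
   if n / 2 % 2 = 1 then '1' else '0',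
   if n % 2 = 1 then '1' else '0']

-- hand port of int(s, 2): exact for strings consisting of '0'/'1' digits (the only strings B feeds it)
def parseBin (l : List Char) (acc : Int) : Int :=
  l.foldl (fun a c => a * 2 + (if c = '1' then 1 else 0)) acc

def three_bit_encode_alt (str : String) : Int :=
  let bits := (str.toList.map (fun ch => fmt3 (dict_encode_b.getD ch 5))).flatten
  parseBin ('0' :: bits) 0

-- ===== PRECONDITION & SPEC =====
def Spec_three_bit_encode (str : String) (out : Int) : Prop := out = three_bit_encode_alt str
instance (str : String) (out : Int) : Decidable (Spec_three_bit_encode str out) := by unfold Spec_three_bit_encode; infer_instance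

-- ===== CLAIM (what is proved, stated in full; the proofs are below) =====
def Claim_equal_three_bit_encode : Prop := ∀ (str : String), Dom_three_bit_encode str → Spec_three_bit_encode str (three_bit_encode str)

-- ===== LEMMAS AND PROOFS =====

theorem parseBin_append (l1 l2 : List Char) (a : Int) :
    parseBin (l1 ++ l2) a = parseBin l2 (parseBin l1 a) := by
  simp [parseBin, List.foldl_append]

-- per-character: parsing the 3-bit chunk of B's code equals A's shift-and-add step
-- parsing the 3-digit chunk of a code v ∈ {1,…,5} is one shift-and-add step
theorem chunk_val (v : Int) (a : Int) (h : v = 1 ∨ v = 2 ∨ v = 3 ∨ v = 4 ∨ v = 5) :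
    parseBin (fmt3 v) a = a * 8 + v := by
  rcases h with h | h | h | h | h <;> subst h <;> simp [parseBin, fmt3] <;> ring

-- per-character: parsing the 3-bit chunk of B's code equals A's shift-and-add step
theorem step_eq (c : Char) (a : Int) :
    parseBin (fmt3 (dict_encode_b.getD c 5)) a
      = a * 8 + dict_encode.getD (if dict_encode.contains c then c else 'N') 0 := by
  by_cases h : c = 'A'
  · subst h
    rw [show dict_encode_b.getD 'A' 5 = 1 from by decide,
        show dict_encode.getD (if dict_encode.contains 'A' = true then 'A' else 'N') 0 = 1 from by decide]
    exact chunk_val 1 a (by norm_num)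
  by_cases h : c = 'C'
  · subst h
    rw [show dict_encode_b.getD 'C' 5 = 3 from by decide,
        show dict_encode.getD (if dict_encode.contains 'C' = true then 'C' else 'N') 0 = 3 from by decide]
    exact chunk_val 3 a (by norm_num)
  by_cases h : c = 'G'
  · subst h
    rw [show dict_encode_b.getD 'G' 5 = 2 from by decide,
        show dict_encode.getD (if dict_encode.contains 'G' = true then 'G' else 'N') 0 = 2 from by decide]
    exact chunk_val 2 a (by norm_num)
  by_cases h : c = 'T'
  · subst h
    rw [show dict_encode_b.getD 'T' 5 = 4 from by decide,
        show dict_encode.getD (if dict_encode.contains 'T' = true then 'T' else 'N') 0 = 4 from by decide]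
    exact chunk_val 4 a (by norm_num)
  by_cases h : c = 'N'
  · subst h
    rw [show dict_encode_b.getD 'N' 5 = 5 from by decide,
        show dict_encode.getD (if dict_encode.contains 'N' = true then 'N' else 'N') 0 = 5 from by decide]
    exact chunk_val 5 a (by norm_num)
  rename_i h1 h2 h3 h4
  have hdb : dict_encode_b = PySem.Dict.mk [('A', 1), ('C', 3), ('G', 2), ('T', 4), ('N', 5)] := by decide
  have hd : dict_encode = PySem.Dict.mk [('A', 1), ('C', 3), ('G', 2), ('T', 4), ('N', 5)] := by decide
  have hb : dict_encode_b.getD c 5 = 5 := by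
    rw [hdb]
    simp [PySem.Dict.getD_eq_get?_getD, PySem.Dict.get?, Ne.symm h1, Ne.symm h2, Ne.symm h3, Ne.symm h4, Ne.symm h]
  have hcont : dict_encode.contains c = false := by
    rw [hd]
    simp [PySem.Dict.contains, Ne.symm h1, Ne.symm h2, Ne.symm h3, Ne.symm h4, Ne.symm h]
  rw [hb, hcont]
  rw [show ((if (false = true) then c else 'N') = 'N') from by simp,
      show dict_encode.getD 'N' 0 = 5 from by decide]
  exact chunk_val 5 a (by norm_num)

theorem main_eq (l : List Char) (a : Int) :
    parseBin ((l.map (fun ch => fmt3 (dict_encode_b.getD ch 5))).flatten) a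
      = l.foldl (fun bytes c =>
          let bytes := bytes * 8
          let base := if dict_encode.contains c then c else 'N'
          bytes + dict_encode.getD base 0) a := by
  induction l generalizing a with
  | nil => simp [parseBin]
  | cons c tl ih =>
      simp only [List.map_cons, List.flatten_cons, List.foldl_cons, parseBin_append]
      rw [step_eq, ih]

-- ===== VERDICT (by name: the statement is the Claim_ definition above) =====
theorem three_bit_encode_spec : Claim_equal_three_bit_encode := by
  intro s _
  unfold Spec_three_bit_encode three_bit_encode three_bit_encode_alt
  have h0 : parseBin ('0' :: (s.toList.map (fun ch => fmt3 (dict_encode_b.getD ch 5))).flatten) 0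
      = parseBin ((s.toList.map (fun ch => fmt3 (dict_encode_b.getD ch 5))).flatten) 0 := by
    simp [parseBin]
  rw [h0, main_eq]
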